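-- pv_equiv track=rewrite | github.com/JavierGONL/Reto_1_Poo | Reto_1_Ejercicio_5.py | mismos_caracteres
-- ===== SOURCE A (Python) =====
-- def mismos_caracteres(lista_palabras):
--     palabras_caracteres_iguales = []
--     for i in range(len(lista_palabras)):
--         # Comenzamos desde i + 1 para evitar comparaciones duplicadas
--         for j in range(i + 1, len(lista_palabras)):
--             # sorted ordena los caracteres de la a a la z
--             if sorted(lista_palabras[i]) == sorted(lista_palabras[j]):
--                 if lista_palabras[i] not in palabras_caracteres_iguales:
--                     palabras_caracteres_iguales.append(lista_palabras[i])
--                 if lista_palabras[j] not in palabras_caracteres_iguales: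
--                     palabras_caracteres_iguales.append(lista_palabras[j])
--
--     return palabras_caracteres_iguales
-- ===== SOURCE B (Python) =====
-- def mismos_caracteres(lista_palabras):
--     # Group words by their sorted-character key (one pass), then emit the
--     # distinct members of each group of size >= 2, groups in first-occurrence order.
--     grupos = {}
--     for palabra in lista_palabras:
--         grupos.setdefault(''.join(sorted(palabra)), []).append(palabra)
--     resultado = []
--     for grupo in grupos.values():
--         if len(grupo) >= 2:
--             resultado.extend(dict.fromkeys(grupo))
--     return resultado
-- ===== Notes on version B (the rewrite author's own statement) =====
-- stated objective: faster
-- what changed: Replaced the all-pairs quadratic scan (sorting both words per comparison) by a single pass that groups words in a dict keyed by their sorted characters and emits the distinct members of each group of size >= 2 in first-occurrence order.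
import Mathlib
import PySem

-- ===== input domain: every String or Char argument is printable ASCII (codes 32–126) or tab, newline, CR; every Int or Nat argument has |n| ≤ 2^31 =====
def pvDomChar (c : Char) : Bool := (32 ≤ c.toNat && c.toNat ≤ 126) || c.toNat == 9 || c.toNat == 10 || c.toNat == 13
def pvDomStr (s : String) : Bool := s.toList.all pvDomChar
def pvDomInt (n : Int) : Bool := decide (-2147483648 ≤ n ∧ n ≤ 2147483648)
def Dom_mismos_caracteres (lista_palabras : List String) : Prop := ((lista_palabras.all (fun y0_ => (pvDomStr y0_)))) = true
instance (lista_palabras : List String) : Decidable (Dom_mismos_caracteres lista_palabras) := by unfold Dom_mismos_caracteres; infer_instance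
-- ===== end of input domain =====

-- B replaces A's all-pairs quadratic scan by one dict pass grouping words by their
-- sorted-character key, emitting groups of size >= 2 in first-occurrence order (faster).

-- sorted(palabra): the characters of a word in sorted order (Python's key list)
def pvKey (w : String) : List Char := PySem.List.sorted w.toList (fun c => c)

-- ===== PORT A =====
def mismos_caracteres (lista_palabras : List String) : List String :=
  (PySem.List.pyRange 0 lista_palabras.length).foldl (fun acc i =>
    (PySem.List.pyRange (i + 1) lista_palabras.length).foldl (fun acc j =>
      if pvKey (PySem.List.pyGetD lista_palabras i "") = pvKey (PySem.List.pyGetD lista_palabras j "") then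
        let acc1 := if acc.contains (PySem.List.pyGetD lista_palabras i "") then acc
                    else acc ++ [PySem.List.pyGetD lista_palabras i ""]
        if acc1.contains (PySem.List.pyGetD lista_palabras j "") then acc1
        else acc1 ++ [PySem.List.pyGetD lista_palabras j ""]
      else acc) acc) []

-- ===== PORT B =====
def mismos_caracteres_alt (lista_palabras : List String) : List String :=
  let grupos : PySem.Dict (List Char) (List String) :=
    lista_palabras.foldl (fun d w => d.modify (pvKey w) [] (fun g => g ++ [w])) PySem.Dict.empty
  grupos.values.foldl (fun res g => if 2 ≤ g.length then res ++ PySem.List.dedup g else res) []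

-- ===== PRECONDITION & SPEC =====
def Spec_mismos_caracteres (lista_palabras : List String) (out : List String) : Prop := out = mismos_caracteres_alt lista_palabras
instance (lista_palabras : List String) (out : List String) : Decidable (Spec_mismos_caracteres lista_palabras out) := by unfold Spec_mismos_caracteres; infer_instance

-- ===== CLAIM (what is proved, stated in full; the proofs are below) =====
def Claim_equal_mismos_caracteres : Prop := ∀ (lista_palabras : List String), Dom_mismos_caracteres lista_palabras → Spec_mismos_caracteres lista_palabras (mismos_caracteres lista_palabras)

-- ===== LEMMAS AND PROOFS =====

-- one comparison step of A's inner loop, with the pair (w = lista[i], v = lista[j])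
def pvStep (w : String) (acc : List String) (v : String) : List String :=
  if pvKey w = pvKey v then PySem.Set.add (PySem.Set.add acc w) v else acc

-- A's double loop as structural recursion over suffixes
def pvGo (acc : List String) : List String → List String
  | [] => acc
  | w :: rest => pvGo (rest.foldl (pvStep w) acc) rest

-- the per-group output of A/B, recursively over the list, K = keys already handled
def pvBout (K : List (List Char)) : List String → List String
  | [] => []
  | w :: rest =>
    if pvKey w ∈ K then pvBout K rest
    else
      let g := rest.filter (fun v => pvKey v == pvKey w)
      if g.isEmpty then pvBout K rest
      else PySem.List.dedup (w :: g) ++ pvBout (pvKey w :: K) rest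

-- first-occurrence dedup as structural recursion (= PySem.List.dedup, lemma below)
def pvDedup {α : Type} [BEq α] : List α → List α
  | [] => []
  | a :: l => a :: pvDedup (l.filter (fun b => !(b == a)))
  termination_by l => l.length
  decreasing_by simpa using le_trans (List.length_filter_le _ _) (by simp)

lemma pvFoldlAdd_eq {α : Type} [BEq α] [LawfulBEq α] (l : List α) (acc : List α) :
    l.foldl PySem.Set.add acc = acc ++ pvDedup (l.filter (fun b => !acc.contains b)) := by
  induction l generalizing acc with
  | nil => simp [pvDedup]
  | cons a t ih =>
    by_cases h : acc.contains a
    · have h' : a ∈ acc := by simpa using h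
      have hadd : PySem.Set.add acc a = acc := by simp [PySem.Set.add, h']
      simp only [List.foldl_cons, hadd, List.filter_cons, h, Bool.not_true]
      exact ih acc
    · have h' : a ∉ acc := by simpa using h
      have hadd : PySem.Set.add acc a = acc ++ [a] := by simp [PySem.Set.add, h']
      have hfil : t.filter (fun b => !(acc ++ [a]).contains b)
          = (t.filter (fun b => !acc.contains b)).filter (fun b => !(b == a)) := by
        rw [List.filter_filter]
        apply List.filter_congr
        intro b _
        by_cases hba : b = a
        · subst hba; simp
        · simp [hba]
      simp only [List.foldl_cons, hadd, List.filter_cons, h, Bool.not_false, if_pos]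
      rw [ih (acc ++ [a]), hfil]
      simp [pvDedup]

lemma pvDedup_eq {α : Type} [BEq α] [LawfulBEq α] (l : List α) :
    PySem.List.dedup l = pvDedup l := by
  have h := pvFoldlAdd_eq l ([] : List α)
  simpa [PySem.List.dedup, PySem.Set.ofList, PySem.Set.empty] using h

lemma pvDedup_filter {α : Type} [BEq α] [LawfulBEq α] (p : α → Bool) (l : List α) :
    pvDedup (l.filter p) = (pvDedup l).filter p := by
  have main : ∀ (n : Nat) (l : List α), l.length ≤ n →
      pvDedup (l.filter p) = (pvDedup l).filter p := by
    intro n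
    induction n with
    | zero => intro l hl; rw [List.length_eq_zero_iff.mp (Nat.le_zero.mp hl)]; simp [pvDedup]
    | succ n ih =>
      intro l hl
      match l with
      | [] => simp [pvDedup]
      | a :: t =>
        simp only [List.length_cons, Nat.succ_le_succ_iff] at hl
        by_cases hp : p a
        · have h1 : ((t.filter p).filter (fun b => !(b == a)))
              = ((t.filter (fun b => !(b == a))).filter p) := by
            rw [List.filter_filter, List.filter_filter]
            apply List.filter_congr; intro b _; exact Bool.and_comm _ _
          have lhs : pvDedup ((a :: t).filter p)
              = a :: pvDedup ((t.filter p).filter (fun b => !(b == a))) := by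
            rw [List.filter_cons_of_pos hp]; simp [pvDedup]
          have rhs : (pvDedup (a :: t)).filter p
              = a :: (pvDedup (t.filter (fun b => !(b == a)))).filter p := by
            simp [pvDedup, List.filter_cons_of_pos, hp]
          rw [lhs, rhs, h1, ih _ (le_trans (List.length_filter_le _ _) hl)]
        · have h1 : (t.filter (fun b => !(b == a))).filter p = t.filter p := by
            rw [List.filter_filter]
            apply List.filter_congr; intro b _
            by_cases hba : b = a
            · subst hba; simp [hp]
            · simp [hba]
          have lhs : pvDedup ((a :: t).filter p) = pvDedup (t.filter p) := by
            rw [List.filter_cons_of_neg (by simpa using hp)]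
          have rhs : (pvDedup (a :: t)).filter p
              = (pvDedup (t.filter (fun b => !(b == a)))).filter p := by
            simp [pvDedup, List.filter_cons_of_neg, hp]
          rw [lhs, rhs, ← ih _ (le_trans (List.length_filter_le _ _) hl), h1]
  exact main l.length l le_rfl

lemma pvMem_pvDedup {α : Type} [BEq α] [LawfulBEq α] (l : List α) (x : α) :
    x ∈ pvDedup l ↔ x ∈ l := by
  rw [← pvDedup_eq]; exact PySem.List.mem_dedup l x

-- A's outer index loop, peeled one suffix at a time
lemma pvOuter (xs : List String) :
    ∀ (n k : Nat), xs.length = k + n → ∀ (acc : List String),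
      (PySem.List.pyRange (k : Int) (xs.length : Int)).foldl
        (fun acc i =>
          (PySem.List.pyRange (i + 1) (xs.length : Int)).foldl
            (fun a j => pvStep (PySem.List.pyGetD xs i "") a (PySem.List.pyGetD xs j "")) acc) acc
      = pvGo acc (xs.drop k) := by
  intro n
  induction n with
  | zero =>
    intro k hk acc
    rw [PySem.List.pyRange_one_eq_nil (by exact_mod_cast Nat.le_of_eq (by omega : xs.length = k)),
      List.drop_of_length_le (by omega)]
    rfl
  | succ n ih =>
    intro k hk acc
    have hklt : k < xs.length := by omega
    rw [PySem.List.pyRange_one_cons (by exact_mod_cast hklt)]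
    simp only [List.foldl_cons]
    have hcast : ((k : Int) + 1) = ((k + 1 : Nat) : Int) := by push_cast; ring
    rw [hcast, PySem.List.foldl_pyRange_pyGetD' xs ""
      (pvStep (PySem.List.pyGetD xs (k : Int) "")) acc (by positivity)]
    rw [PySem.List.pyGetD_eq_getElem xs "" (by positivity) (by exact_mod_cast hklt)]
    rw [ih (k + 1) (by omega)]
    rw [List.drop_eq_getElem_cons hklt]
    simp [pvGo, Int.toNat_natCast]

-- A's port equals pvGo
lemma pvA_eq_go (xs : List String) : mismos_caracteres xs = pvGo [] xs := by
  have h := pvOuter xs xs.length 0 (by omega) []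
  simp only [Nat.cast_zero, List.drop_zero] at h
  rw [← h]
  rfl

-- inner fold = insert stream of matching pairs
lemma pvInner_eq (w : String) (rest : List String) (acc : List String) :
    rest.foldl (pvStep w) acc
      = ((rest.filter (fun v => pvKey v == pvKey w)).flatMap (fun v => [w, v])).foldl
          PySem.Set.add acc := by
  induction rest generalizing acc with
  | nil => rfl
  | cons v t ih =>
    by_cases h : pvKey w = pvKey v
    · simp only [List.foldl_cons, List.filter_cons,
        show (pvKey v == pvKey w) = true by simp [h.symm], if_pos,
        List.flatMap_cons, List.foldl_append]
      rw [ih]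
      simp [pvStep, h]
    · simp only [List.foldl_cons, List.filter_cons,
        show (pvKey v == pvKey w) = false by simp [Ne.symm h]]
      rw [ih]
      simp [pvStep, h]

lemma pvFoldlAdd_of_subset (l : List String) (acc : List String)
    (h : ∀ x ∈ l, x ∈ acc) : l.foldl PySem.Set.add acc = acc := by
  induction l generalizing acc with
  | nil => rfl
  | cons a t ih =>
    have ha : PySem.Set.add acc a = acc := by
      simp [PySem.Set.add, h a (by simp)]
    simp only [List.foldl_cons, ha]
    exact ih acc (fun x hx => h x (by simp [hx]))

lemma pvFoldlAdd_pairs_of_mem (w : String) (g : List String) (acc : List String)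
    (h : w ∈ acc) : (g.flatMap (fun v => [w, v])).foldl PySem.Set.add acc
      = g.foldl PySem.Set.add acc := by
  induction g generalizing acc with
  | nil => rfl
  | cons v t ih =>
    have hw : PySem.Set.add acc w = acc := by simp [PySem.Set.add, h]
    simp only [List.flatMap_cons, List.foldl_append, List.foldl_cons, hw]
    exact ih _ ((PySem.Set.mem_add acc v w).mpr (Or.inl h))

lemma pvFoldlAdd_fresh (l : List String) (acc b : List String)
    (h : ∀ x ∈ l, x ∉ acc) :
    l.foldl PySem.Set.add (acc ++ b) = acc ++ l.foldl PySem.Set.add b := by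
  induction l generalizing b with
  | nil => rfl
  | cons a t ih =>
    have hna : a ∉ acc := h a (by simp)
    have hadd : PySem.Set.add (acc ++ b) a = acc ++ PySem.Set.add b a := by
      by_cases hb : a ∈ b
      · simp [PySem.Set.add, hb, hna]
      · simp [PySem.Set.add, hb, hna]
    simp only [List.foldl_cons, hadd]
    exact ih _ (fun x hx => h x (by simp [hx]))

-- the main invariant: pvGo appends exactly the groups not yet handled
lemma pvGo_eq_bout (s : List String) (K : List (List Char)) (acc : List String)
    (h1 : ∀ v ∈ s, pvKey v ∈ K → v ∈ acc) (h2 : ∀ u ∈ acc, pvKey u ∈ K) :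
    pvGo acc s = acc ++ pvBout K s := by
  induction s generalizing K acc with
  | nil => simp [pvGo, pvBout]
  | cons w rest ih =>
    simp only [pvGo]
    rw [pvInner_eq]
    by_cases hK : pvKey w ∈ K
    · have hall : ∀ x ∈ (rest.filter (fun v => pvKey v == pvKey w)).flatMap
          (fun v => [w, v]), x ∈ acc := by
        intro x hx
        simp only [List.mem_flatMap] at hx
        obtain ⟨v, hv, hxv⟩ := hx
        have hvk : pvKey v = pvKey w := by simpa using List.of_mem_filter hv
        have hx' : x = w ∨ x = v := by simpa using hxv
        rcases hx' with h | h
        · subst h; exact h1 _ (by simp) hK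
        · subst h; exact h1 _ (List.mem_cons_of_mem _ (List.mem_of_mem_filter hv)) (hvk ▸ hK)
      rw [pvFoldlAdd_of_subset _ _ hall,
        ih K acc (fun v hv hk => h1 v (by simp [hv]) hk) h2]
      simp [pvBout, hK]
    · by_cases hge : rest.filter (fun v => pvKey v == pvKey w) = []
      · rw [hge]
        simp only [List.flatMap_nil, List.foldl_nil]
        rw [ih K acc (fun v hv hk => h1 v (by simp [hv]) hk) h2]
        have hB : pvBout K (w :: rest) = pvBout K rest := by
          simp [pvBout, hK, hge]
        rw [hB]
      · have hfresh : ∀ x ∈ w :: rest.filter (fun v => pvKey v == pvKey w), x ∉ acc := by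
          intro x hx hxa
          have hkx : pvKey x = pvKey w := by
            rcases List.mem_cons.mp hx with rfl | hx'
            · rfl
            · simpa using List.of_mem_filter hx'
          exact hK (hkx ▸ h2 x hxa)
        have hpairs : ((rest.filter (fun v => pvKey v == pvKey w)).flatMap
              (fun v => [w, v])).foldl PySem.Set.add acc
            = (w :: rest.filter (fun v => pvKey v == pvKey w)).foldl PySem.Set.add acc := by
          obtain ⟨v, g', hgv⟩ := List.exists_cons_of_ne_nil hge
          rw [hgv]
          simp only [List.flatMap_cons, List.foldl_append, List.foldl_cons, List.foldl_nil]
          rw [pvFoldlAdd_pairs_of_mem _ _ _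
            ((PySem.Set.mem_add _ v w).mpr (Or.inl ((PySem.Set.mem_add acc w w).mpr (Or.inr rfl))))]
        have hsplit : (w :: rest.filter (fun v => pvKey v == pvKey w)).foldl PySem.Set.add acc
            = acc ++ PySem.List.dedup (w :: rest.filter (fun v => pvKey v == pvKey w)) := by
          have h' := pvFoldlAdd_fresh (w :: rest.filter (fun v => pvKey v == pvKey w)) acc [] hfresh
          simpa [PySem.List.dedup, PySem.Set.ofList, PySem.Set.empty] using h'
        have h1' : ∀ v' ∈ rest, pvKey v' ∈ pvKey w :: K →
            v' ∈ acc ++ PySem.List.dedup (w :: rest.filter (fun v => pvKey v == pvKey w)) := by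
          intro v' hv' hk
          rcases List.mem_cons.mp hk with hk | hk
          · refine List.mem_append_right _ ?_
            rw [PySem.List.mem_dedup]
            exact List.mem_cons_of_mem _ (List.mem_filter.mpr ⟨hv', by simp [hk]⟩)
          · exact List.mem_append_left _ (h1 v' (by simp [hv']) hk)
        have h2' : ∀ u ∈ acc ++ PySem.List.dedup (w :: rest.filter (fun v => pvKey v == pvKey w)),
            pvKey u ∈ pvKey w :: K := by
          intro u hu
          rcases List.mem_append.mp hu with hu | hu
          · exact List.mem_cons_of_mem _ (h2 u hu)
          · rw [PySem.List.mem_dedup] at hu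
            rcases List.mem_cons.mp hu with rfl | hu'
            · exact List.mem_cons_self ..
            · have : pvKey u = pvKey w := by simpa using List.of_mem_filter hu'
              simp [this]
        rw [hpairs, hsplit, ih (pvKey w :: K) _ h1' h2']
        simp [pvBout, hK, hge, List.append_assoc]

def pvGrp (xs : List String) (c : List Char) : List String :=
  xs.filter (fun w => pvKey w == c)

-- B's port equals the fold over first-occurrence-deduped keys
lemma pvB_eq_keysfold (xs : List String) :
    mismos_caracteres_alt xs
      = (PySem.List.dedup (xs.map pvKey)).foldl
          (fun res k => if 2 ≤ (pvGrp xs k).length then res ++ PySem.List.dedup (pvGrp xs k) else res) [] := by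
  have hpairs : xs.foldl (fun d w => d.modify (pvKey w) [] (fun g => g ++ [w]))
        (PySem.Dict.empty : PySem.Dict (List Char) (List String))
      = (xs.map (fun w => (pvKey w, w))).foldl
          (fun d p => d.modify p.1 [] (fun g => g ++ [p.2])) PySem.Dict.empty := by
    rw [List.foldl_map]
  have hkeys : (xs.foldl (fun d w => d.modify (pvKey w) [] (fun g => g ++ [w]))
        (PySem.Dict.empty : PySem.Dict (List Char) (List String))).keys
      = PySem.List.dedup (xs.map pvKey) := by
    rw [PySem.Dict.keys_foldl_modify_key xs pvKey [] (fun _ w g => g ++ [w]) PySem.Dict.empty]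
    rfl
  have hnodup : (xs.foldl (fun d w => d.modify (pvKey w) [] (fun g => g ++ [w]))
        (PySem.Dict.empty : PySem.Dict (List Char) (List String))).keys.Nodup := by
    exact PySem.Dict.nodup_keys_foldl_modify_key xs pvKey [] (fun _ w g => g ++ [w])
      PySem.Dict.empty (by simp [PySem.Dict.keys, PySem.Dict.empty])
  have hgetD : ∀ c, (xs.foldl (fun d w => d.modify (pvKey w) [] (fun g => g ++ [w]))
        (PySem.Dict.empty : PySem.Dict (List Char) (List String))).getD c []
      = pvGrp xs c := by
    intro c
    rw [hpairs, PySem.Dict.getD_foldl_modify_append (xs.map (fun w => (pvKey w, w)))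
      PySem.Dict.empty c]
    simp [pvGrp, List.filter_map, Function.comp_def]
  show (xs.foldl (fun d w => d.modify (pvKey w) [] (fun g => g ++ [w]))
        (PySem.Dict.empty : PySem.Dict (List Char) (List String))).values.foldl
      (fun res g => if 2 ≤ g.length then res ++ PySem.List.dedup g else res) [] = _
  rw [PySem.Dict.values_eq_map_keys _ hnodup []]
  rw [show (fun k => (xs.foldl (fun d w => d.modify (pvKey w) [] (fun g => g ++ [w]))
      (PySem.Dict.empty : PySem.Dict (List Char) (List String))).getD k [])
    = pvGrp xs from funext hgetD]
  rw [List.foldl_map, hkeys]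

-- the keys-fold equals pvBout
lemma pvBout_eq_keysfold (xs : List String) (K : List (List Char)) (res : List String) :
    res ++ pvBout K xs
      = ((pvDedup (xs.map pvKey)).filter (fun k => decide (k ∉ K))).foldl
          (fun res k => if 2 ≤ (pvGrp xs k).length then res ++ PySem.List.dedup (pvGrp xs k) else res) res := by
  induction xs generalizing K res with
  | nil => simp [pvBout, pvDedup]
  | cons w rest ih =>
    have hgrp_ne : ∀ k, k ≠ pvKey w → pvGrp (w :: rest) k = pvGrp rest k := by
      intro k hk
      simp only [pvGrp, List.filter_cons]
      rw [if_neg (by simp [Ne.symm hk] : ¬((pvKey w == k) = true))]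
    have hhead : pvDedup ((w :: rest).map pvKey)
        = pvKey w :: (pvDedup (rest.map pvKey)).filter (fun b => !(b == pvKey w)) := by
      simp only [List.map_cons, pvDedup]
      rw [pvDedup_filter]
    rw [hhead]
    by_cases hK : pvKey w ∈ K
    · have hq : (decide (pvKey w ∉ K)) = false := by simp [hK]
      rw [List.filter_cons_of_neg (by simp [hq])]
      rw [List.filter_filter]
      have hpred : ((pvDedup (rest.map pvKey)).filter
            (fun b => decide (b ∉ K) && !(b == pvKey w)))
          = (pvDedup (rest.map pvKey)).filter (fun k => decide (k ∉ K)) := by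
        apply List.filter_congr
        intro b _
        by_cases hbK : b ∈ K
        · simp [hbK]
        · have : b ≠ pvKey w := fun h => hbK (h ▸ hK)
          simp [hbK, this]
      rw [hpred]
      rw [PySem.List.foldl_congr_mem _ _
        (fun res k => if 2 ≤ (pvGrp rest k).length then res ++ PySem.List.dedup (pvGrp rest k) else res)
        res ?_]
      · rw [← ih K res]
        simp [pvBout, hK]
      · intro acc k hk
        have hknK : k ∉ K := by simpa using (List.mem_filter.mp hk).2
        rw [hgrp_ne k (fun h => hknK (h ▸ hK))]
    · have hq : (decide (pvKey w ∉ K)) = true := by simp [hK]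
      rw [List.filter_cons_of_pos (by simp [hq])]
      simp only [List.foldl_cons]
      have hgrp_self : pvGrp (w :: rest) (pvKey w)
          = w :: rest.filter (fun v => pvKey v == pvKey w) := by
        simp [pvGrp]
      by_cases hge : rest.filter (fun v => pvKey v == pvKey w) = []
      · have hF : (if 2 ≤ (pvGrp (w :: rest) (pvKey w)).length
            then res ++ PySem.List.dedup (pvGrp (w :: rest) (pvKey w)) else res) = res := by
          rw [hgrp_self, hge]
          simp
        rw [hF]
        have hT : (pvDedup (rest.map pvKey)).filter (fun b => !(b == pvKey w))
            = pvDedup (rest.map pvKey) := by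
          rw [List.filter_eq_self]
          intro b hb
          rw [pvMem_pvDedup] at hb
          obtain ⟨v, hv, rfl⟩ := List.mem_map.mp hb
          have : ¬(pvKey v == pvKey w) = true := by
            intro hbe
            exact (List.ne_nil_of_mem (List.mem_filter.mpr ⟨hv, hbe⟩)) hge
          simpa using this
        rw [hT]
        rw [PySem.List.foldl_congr_mem _ _
          (fun res k => if 2 ≤ (pvGrp rest k).length then res ++ PySem.List.dedup (pvGrp rest k) else res)
          res ?_]
        · rw [← ih K res]
          simp [pvBout, hK, hge]
        · intro acc k hk
          have hkmem : k ∈ pvDedup (rest.map pvKey) := (List.mem_filter.mp hk).1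
          rw [pvMem_pvDedup] at hkmem
          obtain ⟨v, hv, rfl⟩ := List.mem_map.mp hkmem
          have hne : pvKey v ≠ pvKey w :=
            fun h => (List.ne_nil_of_mem (List.mem_filter.mpr ⟨hv, by simp [h]⟩)) hge
          simp only [hgrp_ne _ hne]
      · have hF : (if 2 ≤ (pvGrp (w :: rest) (pvKey w)).length
            then res ++ PySem.List.dedup (pvGrp (w :: rest) (pvKey w)) else res)
            = res ++ PySem.List.dedup (w :: rest.filter (fun v => pvKey v == pvKey w)) := by
          rw [hgrp_self]
          rw [if_pos]
          have := List.length_pos_iff.mpr hge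
          simp only [List.length_cons]
          omega
        rw [hF]
        rw [List.filter_filter]
        have hpred : ((pvDedup (rest.map pvKey)).filter
              (fun b => decide (b ∉ K) && !(b == pvKey w)))
            = (pvDedup (rest.map pvKey)).filter (fun k => decide (k ∉ pvKey w :: K)) := by
          apply List.filter_congr
          intro b _
          by_cases hbw : b = pvKey w
          · simp [hbw]
          · by_cases hbK : b ∈ K <;> simp [hbw, hbK]
        rw [hpred]
        rw [PySem.List.foldl_congr_mem _ _
          (fun res k => if 2 ≤ (pvGrp rest k).length then res ++ PySem.List.dedup (pvGrp rest k) else res)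
          _ ?_]
        · rw [← ih (pvKey w :: K) (res ++ PySem.List.dedup (w :: rest.filter (fun v => pvKey v == pvKey w)))]
          simp [pvBout, hK, hge, List.append_assoc]
        · intro acc k hk
          have hknK : k ∉ pvKey w :: K := by simpa using (List.mem_filter.mp hk).2
          have hne : k ≠ pvKey w := fun h => hknK (List.mem_cons.mpr (Or.inl h))
          simp only [hgrp_ne _ hne]

-- ===== VERDICT (by name: the statement is the Claim_ definition above) =====
theorem mismos_caracteres_spec : Claim_equal_mismos_caracteres := by
  intro xs _
  show mismos_caracteres xs = mismos_caracteres_alt xs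
  rw [pvA_eq_go, pvGo_eq_bout xs [] [] (by simp) (by simp), pvB_eq_keysfold,
    pvDedup_eq (xs.map pvKey)]
  have h := pvBout_eq_keysfold xs [] []
  simp only [List.not_mem_nil, not_false_iff, decide_true, List.filter_true,
    List.nil_append] at h
  exact h
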